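-- pv_equiv track=rewrite | github.com/andrefpoliveira/AdventOfCode | 2015/day16.py | part1
-- ===== SOURCE A (Python) =====
-- def part1(sues, info):
--     matches = []
--     for sue in sues:
--         match = 0
--         d = sue
--         for key in d:
--             if info[key] == d[key]: match += 1
--
--         matches.append(match)
--     return matches.index(max(matches))+1
-- ===== SOURCE B (Python) =====
-- def part1(sues, info):
--     # Sort-based selection: order sue indices by (negated match count, index), take the first.
--     order = sorted(range(len(sues)),
--                    key=lambda i: (-sum(info[k] == v for k, v in sues[i].items()), i))
--     return order[0] + 1
-- ===== Notes on version B (the rewrite author's own statement) =====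
-- stated objective: alternative
-- what changed: Replaces A's build-a-matches-list then scan it twice (max, then .index) with a sort-based selection: B sorts the sue indices by the tuple (negated match count, index) and returns the first index + 1; the per-index match count is a sum over the sue's own items instead of A's key loop with twin dict lookups.
import Mathlib
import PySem

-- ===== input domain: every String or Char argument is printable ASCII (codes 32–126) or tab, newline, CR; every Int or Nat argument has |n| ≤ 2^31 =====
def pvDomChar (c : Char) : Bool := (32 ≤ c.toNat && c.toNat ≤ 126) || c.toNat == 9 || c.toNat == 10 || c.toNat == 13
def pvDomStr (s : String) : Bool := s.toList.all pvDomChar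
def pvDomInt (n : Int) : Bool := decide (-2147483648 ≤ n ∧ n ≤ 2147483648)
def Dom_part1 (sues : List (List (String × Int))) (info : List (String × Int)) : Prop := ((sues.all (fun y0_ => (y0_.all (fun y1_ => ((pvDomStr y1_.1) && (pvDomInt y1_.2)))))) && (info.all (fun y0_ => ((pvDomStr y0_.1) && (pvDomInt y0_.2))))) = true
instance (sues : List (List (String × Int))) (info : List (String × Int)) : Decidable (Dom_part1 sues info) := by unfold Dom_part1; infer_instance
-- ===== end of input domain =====

-- B replaces A's matches-list + max + .index with a sort-based selection: sort the sue
-- indices by the tuple (negated match count, index) and return the first, + 1.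

-- ===== PORT A =====
def part1 (sues : List (List (String × Int))) (info : List (String × Int)) : Int :=
  -- dict arguments are marshalled through PySem.Dict.ofList (Python dict: last value wins)
  let infoD := PySem.Dict.ofList info
  -- matches = []; for sue in sues: count keys of sue with info[key] == sue[key]; append
  let matchesL : List Int := sues.foldl (fun acc sue =>
    let d := PySem.Dict.ofList sue
    acc ++ [d.keys.foldl (fun m key => if infoD.get? key == d.get? key then m + 1 else m) 0]) []
  -- matches.index(max(matches)) + 1  (max/[].index raise on empty / absent: excluded by Pre_)
  ((PySem.List.index? matchesL ((PySem.List.max? matchesL (fun x => x)).getD 0)).getD 0 : Int) + 1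

-- ===== PORT B =====
def part1_alt (sues : List (List (String × Int))) (info : List (String × Int)) : Int :=
  let infoD := PySem.Dict.ofList info
  -- order = sorted(range(len(sues)), key=lambda i: (-sum(info[k] == v for k, v in sues[i].items()), i))
  let order := PySem.List.sorted2 (PySem.List.pyRange 0 sues.length 1)
    (fun i => -(((PySem.Dict.ofList (PySem.List.pyGetD sues i [])).items.map
        (fun q => if infoD.get? q.1 == some q.2 then (1 : Int) else 0)).sum))
    (fun i => i) false
  -- return order[0] + 1  (order[0] raises IndexError on empty sues: excluded by Pre_)
  (PySem.List.pyGet? order 0).getD 0 + 1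

-- ===== PRECONDITION & SPEC =====
-- Pre_ excludes empty sues (Python A raises ValueError from max([])) and any sue key absent
-- from info (A raises KeyError on info[key]).
def Pre_part1 (sues : List (List (String × Int))) (info : List (String × Int)) : Prop :=
  sues ≠ [] ∧ ∀ sue ∈ sues, ∀ p ∈ sue, (info.find? (fun q => q.1 == p.1)).isSome
instance (sues : List (List (String × Int))) (info : List (String × Int)) : Decidable (Pre_part1 sues info) := by unfold Pre_part1; infer_instance

def pvWitness_part1 : (List (List (String × Int))) × (List (String × Int)) :=
  ([[("a", 1)], [("a", 2), ("b", 3)]], [("a", 1), ("b", 3)])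

def Spec_part1 (sues : List (List (String × Int))) (info : List (String × Int)) (out : Int) : Prop := out = part1_alt sues info
instance (sues : List (List (String × Int))) (info : List (String × Int)) (out : Int) : Decidable (Spec_part1 sues info out) := by unfold Spec_part1; infer_instance

-- ===== CLAIM (what is proved, stated in full; the proofs are below) =====
def Claim_equal_part1 : Prop := ∀ (sues : List (List (String × Int))) (info : List (String × Int)), Dom_part1 sues info → Pre_part1 sues info → Spec_part1 sues info (part1 sues info)

-- ===== LEMMAS AND PROOFS =====

-- proof-side view of Dict lookup: first match on the items list
def pvGet (d : List (String × Int)) (k : String) : Option Int :=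
  (d.find? (fun q => q.1 == k)).map (·.2)

theorem nodup_items_keys (l : List (String × Int)) :
    ((PySem.Dict.ofList l).items.map (·.1)).Nodup := PySem.Dict.nodup_keys_ofList l

-- (max value, index of its first occurrence), recursively — the spec both ports meet
def fam : List Int → Option (Int × Nat)
  | [] => none
  | x :: tl =>
    match fam tl with
    | none => some (x, 0)
    | some (m, j) => if x < m then some (m, j + 1) else some (x, 0)

theorem fam_cons (x : Int) (tl : List Int) :
    fam (x :: tl) = match fam tl with
      | none => some (x, 0)
      | some (m, j) => if x < m then some (m, j + 1) else some (x, 0) := rfl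

theorem foldl_max_pull (t : List Int) : ∀ a b : Int, t.foldl max (max a b) = max a (t.foldl max b) := by
  induction t with
  | nil => intro a b; simp
  | cons y t ih =>
    intro a b
    simp only [List.foldl_cons, max_assoc]
    exact ih a (max b y)

theorem fam_eq_none_iff : ∀ (ms : List Int), fam ms = none ↔ ms = [] := by
  intro ms
  cases ms with
  | nil => simp [fam]
  | cons x tl =>
    simp only [fam]
    constructor
    · intro h
      rcases htl : fam tl with _ | ⟨m, j⟩ <;> rw [htl] at h
      · simp at h
      · simp only at h; split at h <;> simp at h
    · intro h; cases h

theorem fam_spec : ∀ (ms : List Int) (m : Int) (j : Nat), fam ms = some (m, j) →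
    PySem.List.max? ms (fun x => x) = some m ∧ PySem.List.index? ms m = some j := by
  intro ms
  induction ms with
  | nil => intro m j h; simp [fam] at h
  | cons x tl ih =>
    intro m j h
    cases htl : fam tl with
    | none =>
      have htlnil : tl = [] := (fam_eq_none_iff tl).mp htl
      subst htlnil
      simp only [fam] at h
      injection h with h; injection h with h1 h2
      subst h1; subst h2
      exact ⟨by rw [PySem.List.max?_id_cons]; rfl, PySem.List.index?_cons_self x []⟩
    | some p =>
      obtain ⟨m', j'⟩ := p
      rw [fam_cons, htl] at h
      have h2 : (if x < m' then some (m', j' + 1) else some (x, (0 : Nat))) = some (m, j) := h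
      obtain ⟨hmax', hidx'⟩ := ih m' j' htl
      have htlne : tl ≠ [] := by
        intro he; rw [he] at htl; simp [fam] at htl
      obtain ⟨y, t, rfl⟩ := List.exists_cons_of_ne_nil htlne
      have hm'fold : t.foldl max y = m' := by
        rw [PySem.List.max?_id_cons] at hmax'
        exact Option.some_injective _ hmax'
      have hxfold : List.foldl max x (y :: t) = max x m' := by
        simp only [List.foldl_cons]
        calc t.foldl max (max x y) = max x (t.foldl max y) := foldl_max_pull t x y
        _ = max x m' := by rw [hm'fold]
      by_cases hlt : x < m'
      · rw [if_pos hlt] at h2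
        injection h2 with h2; injection h2 with h1 h2
        subst h1; subst h2
        refine ⟨?_, ?_⟩
        · rw [PySem.List.max?_id_cons, hxfold, max_eq_right (le_of_lt hlt)]
        · rw [PySem.List.index?_cons_of_ne _ (ne_of_lt hlt), hidx']; rfl
      · rw [if_neg hlt] at h2
        have hge : m' ≤ x := not_lt.mp hlt
        injection h2 with h2; injection h2 with h1 h2
        subst h1; subst h2
        refine ⟨?_, ?_⟩
        · rw [PySem.List.max?_id_cons, hxfold, max_eq_left hge]
        · exact PySem.List.index?_cons_self _ _

theorem fam_of_ne_nil (ms : List Int) (h : ms ≠ []) : ∃ m j, fam ms = some (m, j) := by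
  cases ms with
  | nil => exact absurd rfl h
  | cons x tl =>
    simp only [fam]
    rcases htl : fam tl with _ | p
    · exact ⟨x, 0, rfl⟩
    · obtain ⟨m', j'⟩ := p
      by_cases hlt : x < m'
      · exact ⟨m', j' + 1, by simp [hlt]⟩
      · exact ⟨x, 0, by simp [hlt]⟩

theorem fam_bounds : ∀ (ms : List Int) (m : Int) (j : Nat), fam ms = some (m, j) →
    ∀ y ∈ ms, y ≤ m := by
  intro ms m j h
  exact fun y hy => PySem.List.max?_isMax (fam_spec ms m j h).1 y hy

-- dict self-lookup: with unique keys, looking a pair's key up in its own dict gives that pair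
theorem find_self_of_nodup : ∀ (d : List (String × Int)) (p : String × Int),
    (d.map (·.1)).Nodup → p ∈ d → d.find? (fun q => q.1 == p.1) = some p := by
  intro d
  induction d with
  | nil => intro p _ hp; cases hp
  | cons q tl ih =>
    intro p hnd hp
    simp only [List.map_cons, List.nodup_cons] at hnd
    rcases List.mem_cons.mp hp with rfl | hp'
    · simp [List.find?]
    · have hne : (q.1 == p.1) = false := by
        simp only [beq_eq_false_iff_ne]
        intro he
        exact hnd.1 (he ▸ List.mem_map_of_mem hp')
      simp only [List.find?, hne]
      exact ih p hnd.2 hp'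

-- A's per-sue count, as a 0/1-sum over the sue's own pairs (under unique sue keys)
theorem score_eq (info sue : List (String × Int)) (hnd : (sue.map (·.1)).Nodup) :
    (sue.map (·.1)).foldl (fun m key => if pvGet info key == pvGet sue key then m + 1 else m) 0
      = (sue.map (fun q => if pvGet info q.1 == some q.2 then (1 : Int) else 0)).sum := by
  rw [List.foldl_map]
  rw [PySem.List.foldl_congr_mem' sue _
    (fun m p => if pvGet info p.1 == some p.2 then m + 1 else m) 0
    (by
      intro p hp acc
      have : pvGet sue p.1 = some p.2 := by
        unfold pvGet; rw [find_self_of_nodup sue p hnd hp]; rfl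
      rw [this])]
  rw [PySem.List.foldl_count_if (fun p => pvGet info p.1 == some p.2) sue 0,
      PySem.List.sum_map_ite_one_zero (fun p => pvGet info p.1 == some p.2) sue]
  ring

-- the same fact, restated on the marshalled dicts (definitional coercion)
theorem score_eq_dict (info sue : List (String × Int)) :
    (PySem.Dict.ofList sue).keys.foldl
      (fun m key => if (PySem.Dict.ofList info).get? key == (PySem.Dict.ofList sue).get? key
        then m + 1 else m) 0
    = ((PySem.Dict.ofList sue).items.map
        (fun q => if (PySem.Dict.ofList info).get? q.1 == some q.2 then (1 : Int) else 0)).sum :=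
  score_eq (PySem.Dict.ofList info).items (PySem.Dict.ofList sue).items (nodup_items_keys sue)

-- B's selection fold: the step of min2? with keys (-(sc i), i)
def step2 (sc : Int → Int) (acc : Option Int) (i : Int) : Option Int :=
  match acc with
  | none => some i
  | some b =>
    if (decide (-(sc i) < -(sc b)) || !decide (-(sc b) < -(sc i)) && decide (i < b)) = true
      then some i else some b

-- the head of an insertBy fold is the running minimum under 'before'
theorem head?_foldl_insertBy {α : Type} (before : α → α → Bool) :
    ∀ (xs : List α) (acc : List α),
    (xs.foldl (fun acc x => PySem.List.insertBy before x acc) acc).head?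
      = xs.foldl (fun h x => match h with
          | none => some x
          | some m => if before x m then some x else some m) acc.head? := by
  intro xs
  induction xs with
  | nil => intro acc; rfl
  | cons x tl ih =>
    intro acc
    rw [List.foldl_cons, List.foldl_cons, ih]
    have hh : (PySem.List.insertBy before x acc).head?
        = match acc.head? with
          | none => some x
          | some m => if before x m then some x else some m := by
      cases acc with
      | nil => rfl
      | cons y ys =>
        rw [show PySem.List.insertBy before x (y :: ys)
            = if before x y then x :: y :: ys else y :: PySem.List.insertBy before x ys from rfl]
        by_cases h : before x y <;> simp [h]
    exact congrArg (fun z => List.foldl (fun h x => match h with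
      | none => some x
      | some m => if before x m then some x else some m) z tl) hh

-- sorted(..., key=(-sc, id))[0] is min(..., key=(-sc, id)), i.e. the step2 fold
theorem head?_sorted2 (sc : Int → Int) (l : List Int) :
    (PySem.List.sorted2 l (fun i => -(sc i)) (fun i => i) false).head?
      = l.foldl (step2 sc) none := by
  unfold PySem.List.sorted2
  rw [head?_foldl_insertBy]
  congr 1
  funext h x
  cases h <;> rfl

-- enumerate facts used by the selection loop
theorem enum_fst_ge {α : Type} : ∀ (l : List α) (s : Int) (p : Int × α),
    p ∈ PySem.List.enumerate l s → s ≤ p.1 := by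
  intro l
  induction l with
  | nil => intro s p hp; simp [PySem.List.enumerate] at hp
  | cons x tl ih =>
    intro s p hp
    rw [PySem.List.enumerate_cons] at hp
    rcases List.mem_cons.mp hp with rfl | hp'
    · exact le_refl s
    · exact le_trans (by omega) (ih (s + 1) p hp')

theorem enum_getD {α : Type} (d : α) : ∀ (l : List α) (s : Int) (p : Int × α),
    p ∈ PySem.List.enumerate l s → PySem.List.pyGetD l (p.1 - s) d = p.2 := by
  intro l
  induction l with
  | nil => intro s p hp; simp [PySem.List.enumerate] at hp
  | cons x tl ih =>
    intro s p hp
    rw [PySem.List.enumerate_cons] at hp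
    rcases List.mem_cons.mp hp with rfl | hp'
    · simp [PySem.List.pyGetD_zero_cons]
    · have h1 : s + 1 ≤ p.1 := enum_fst_ge tl (s + 1) p hp'
      have ihp := ih (s + 1) p hp'
      have hk : p.1 - (s + 1) = ((p.1 - (s + 1)).toNat : Int) := by omega
      have hk1 : p.1 - s = (((p.1 - (s + 1)).toNat + 1 : Nat) : Int) := by push_cast; omega
      rw [hk1, PySem.List.pyGetD_natCast]
      rw [hk, PySem.List.pyGetD_natCast] at ihp
      simpa using ihp

-- indices already seen cannot be displaced once they carry a maximal score
theorem loop2_no_update (sc : Int → Int) : ∀ (ms : List Int) (s bi : Int), bi < s →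
    (∀ p ∈ PySem.List.enumerate ms s, sc p.1 = p.2) → (∀ y ∈ ms, y ≤ sc bi) →
    (PySem.List.enumerate ms s).foldl (fun acc p => step2 sc acc p.1) (some bi) = some bi := by
  intro ms
  induction ms with
  | nil => intro s bi _ _ _; simp [PySem.List.enumerate]
  | cons x tl ih =>
    intro s bi hlt hsc hle
    rw [PySem.List.enumerate_cons, List.foldl_cons]
    have hscs : sc s = x := hsc (s, x) (PySem.List.enumerate_cons x tl s ▸ List.mem_cons_self)
    have hcond : (decide (-(sc s) < -(sc bi)) || !decide (-(sc bi) < -(sc s)) && decide (s < bi)) = false := by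
      have hx : x ≤ sc bi := hle x List.mem_cons_self
      simp only [Bool.or_eq_false_iff, Bool.and_eq_false_iff, decide_eq_false_iff_not]
      constructor
      · omega
      · right; omega
    have hstep : step2 sc (some bi) s = some bi := by
      show (if (decide (-(sc s) < -(sc bi)) || !decide (-(sc bi) < -(sc s)) && decide (s < bi)) = true
        then some s else some bi) = some bi
      rw [hcond]
      rfl
    rw [hstep]
    exact ih (s + 1) bi (by omega)
      (fun p hp => hsc p (PySem.List.enumerate_cons x tl s ▸ List.mem_cons_of_mem _ hp))
      (fun y hy => hle y (List.mem_cons_of_mem _ hy))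

-- the selection fold returns the index of the first maximal score
theorem loop2_best (sc : Int → Int) : ∀ (ms : List Int) (m : Int) (j : Nat) (s : Int)
    (acc : Option Int), fam ms = some (m, j) →
    (∀ p ∈ PySem.List.enumerate ms s, sc p.1 = p.2) →
    (acc = none ∨ ∃ bi, acc = some bi ∧ bi < s ∧ sc bi < m) →
    (PySem.List.enumerate ms s).foldl (fun acc p => step2 sc acc p.1) acc = some (s + (j : Int)) := by
  intro ms
  induction ms with
  | nil => intro m j s acc h _ _; simp [fam] at h
  | cons x tl ih =>
    intro m j s acc h hsc hacc
    rw [PySem.List.enumerate_cons, List.foldl_cons]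
    have hscs : sc s = x := hsc (s, x) (PySem.List.enumerate_cons x tl s ▸ List.mem_cons_self)
    have hsc' : ∀ p ∈ PySem.List.enumerate tl (s + 1), sc p.1 = p.2 :=
      fun p hp => hsc p (PySem.List.enumerate_cons x tl s ▸ List.mem_cons_of_mem _ hp)
    have hstepup : ∀ bi, bi < s → sc bi < x → step2 sc (some bi) s = some s := by
      intro bi h1 h2
      have hc : (decide (-(sc s) < -(sc bi)) || !decide (-(sc bi) < -(sc s)) && decide (s < bi)) = true := by
        simp only [Bool.or_eq_true_iff, decide_eq_true_eq]
        left; omega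
      show (if (decide (-(sc s) < -(sc bi)) || !decide (-(sc bi) < -(sc s)) && decide (s < bi)) = true
        then some s else some bi) = some s
      rw [hc]
      rfl
    rcases htl : fam tl with _ | p
    · -- tl = []: the head is the maximum
      have htlnil : tl = [] := (fam_eq_none_iff tl).mp htl
      subst htlnil
      simp only [fam, Option.some_inj, Prod.mk.injEq] at h
      obtain ⟨hm, hj⟩ := h
      rw [← hj]
      rcases hacc with rfl | ⟨bi, rfl, h1, h2⟩
      · simp [step2, PySem.List.enumerate]
      · rw [hstepup bi h1 (by omega)]
        simp [PySem.List.enumerate]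
    · obtain ⟨m', j'⟩ := p
      rw [fam_cons, htl] at h
      have h2 : (if x < m' then some (m', j' + 1) else some (x, (0 : Nat))) = some (m, j) := h
      by_cases hlt : x < m'
      · -- x < m' : the first maximum lives in tl
        rw [if_pos hlt] at h2
        simp only [Option.some_inj, Prod.mk.injEq] at h2
        obtain ⟨hm, hj⟩ := h2
        rw [← hj]
        have hstep : ∃ bi, step2 sc acc s = some bi ∧ bi < s + 1 ∧ sc bi < m' := by
          rcases hacc with rfl | ⟨bi, rfl, hb1, hb2⟩
          · exact ⟨s, rfl, by omega, by omega⟩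
          · by_cases hup : sc bi < x
            · exact ⟨s, hstepup bi hb1 hup, by omega, by omega⟩
            · refine ⟨bi, ?_, by omega, by omega⟩
              have hc : (decide (-(sc s) < -(sc bi)) || !decide (-(sc bi) < -(sc s)) && decide (s < bi)) = false := by
                simp only [Bool.or_eq_false_iff, Bool.and_eq_false_iff, decide_eq_false_iff_not]
                exact ⟨by omega, Or.inr (by omega)⟩
              show (if (decide (-(sc s) < -(sc bi)) || !decide (-(sc bi) < -(sc s)) && decide (s < bi)) = true
                then some s else some bi) = some bi
              rw [hc]
              rfl
        obtain ⟨bi, hbeq, hb1, hb2⟩ := hstep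
        rw [hbeq, ih m' j' (s + 1) (some bi) htl hsc' (Or.inr ⟨bi, rfl, hb1, hm ▸ hb2⟩)]
        simp only [Option.some_inj]
        push_cast; ring
      · -- m' ≤ x : the head is the (first) maximum
        rw [if_neg hlt] at h2
        have hge : m' ≤ x := not_lt.mp hlt
        simp only [Option.some_inj, Prod.mk.injEq] at h2
        obtain ⟨hm, hj⟩ := h2
        rw [← hj]
        have hbnd : ∀ y ∈ tl, y ≤ sc s := by
          intro y hy
          have := fam_bounds tl m' j' htl y hy
          omega
        have hnoup := loop2_no_update sc tl (s + 1) s (by omega) hsc' hbnd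
        rcases hacc with rfl | ⟨bi, rfl, hb1, hb2⟩
        · rw [show step2 sc none s = some s from rfl, hnoup]; simp
        · rw [hstepup bi hb1 (by omega), hnoup]; simp

-- enumerate commutes with mapping the payload
theorem enumerate_map {α β : Type} (f : α → β) : ∀ (l : List α) (k : Int),
    PySem.List.enumerate (l.map f) k = (PySem.List.enumerate l k).map (fun p => (p.1, f p.2)) := by
  intro l
  induction l with
  | nil => intro k; simp [PySem.List.enumerate]
  | cons x tl ih => intro k; simp [PySem.List.enumerate_cons, ih]

theorem pyGet?_zero {α : Type} (xs : List α) : PySem.List.pyGet? xs 0 = xs.head? := by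
  cases xs <;> simp [PySem.List.pyGet?, PySem.List.pyIdx?, List.head?]

-- ===== VERDICT (by name: the statement is the Claim_ definition above) =====
theorem part1_spec : Claim_equal_part1 := by
  unfold Claim_equal_part1
  intro sues info _ hpre
  unfold Spec_part1 part1 part1_alt
  dsimp only
  obtain ⟨hne2, hky⟩ := hpre
  -- A's matches list is the map of per-sue 0/1-sum scores
  rw [PySem.List.foldl_append_singleton_eq_map, List.nil_append]
  rw [List.map_congr_left (fun sue _ => score_eq_dict info sue)]
  set gB : List (String × Int) → Int :=
    fun sue => ((PySem.Dict.ofList sue).items.map (fun q =>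
      if (PySem.Dict.ofList info).get? q.1 == some q.2 then (1 : Int) else 0)).sum with hgB
  -- the score B computes at index i, as a function of the index
  set sc : Int → Int := fun i => gB (PySem.List.pyGetD sues i []) with hsc
  -- B's sorted-selection head is the step2 fold over the enumerated score list
  rw [pyGet?_zero, head?_sorted2 sc (PySem.List.pyRange 0 (sues.length) 1)]
  have hrange : PySem.List.pyRange 0 (sues.length) 1
      = (PySem.List.enumerate (sues.map gB) 0).map (·.1) := by
    rw [PySem.List.map_fst_enumerate]
    simp
  rw [hrange, List.foldl_map]
  -- score consistency: at each enumerated index the score function returns the stored score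
  have hcons : ∀ p ∈ PySem.List.enumerate (sues.map gB) 0, sc p.1 = p.2 := by
    intro p hp
    rw [enumerate_map gB sues 0] at hp
    obtain ⟨q, hq, rfl⟩ := List.mem_map.mp hp
    have := enum_getD ([] : List (String × Int)) sues 0 q hq
    rw [sub_zero] at this
    simp only [hsc, this]
  -- both sides through the recursive first-argmax characterisation
  obtain ⟨m, j, hfam⟩ := fam_of_ne_nil (sues.map gB) (by simpa using hne2)
  obtain ⟨hmax, hidx⟩ := fam_spec _ m j hfam
  rw [loop2_best sc (sues.map gB) m j 0 none hfam hcons (Or.inl rfl)]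
  rw [hmax]
  simp only [Option.getD_some]
  rw [hidx]
  simp only [Option.getD_some]
  ring
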